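-- pv_equiv track=rewrite | github.com/HewlettPackard/python-proliant-sdk | examples/HpRestfulApiExamples.py | boot_order_device_type_to_top
-- ===== SOURCE A (Python) =====
-- def boot_order_device_type_to_top(device_type_str='NIC', current_boot_order=[]):
--     """Returns a modified boot order.
--
--     Moves boot options matching the given device type to the top of the boot order.
--
--     device_type_str    -- A device type to match against.
--     current_boot_order -- The current boot order.
--
--     preconditions:
--     1. device_type_str is valid device type string. e.g "NIC.LOM.1.1.IPv4".
--     2. current_boot_order is a valid list of structured boot strings.
--     e.g. ["Shell.Emb.1.1","NIC.LOM.1.1.IPv4","NIC.LOM.1.1.IPv6","Generic.USB.1.1"]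
--
--     Refer to the HpServerBootSettings.1 schema for additional details.
--
--     """
--     new_boot_order = []
--     no_match = []
--     for struc_boot_str in current_boot_order:
--         if struc_boot_str.startswith(device_type_str):
--             new_boot_order.append(struc_boot_str)
--         else:
--             no_match.append(struc_boot_str)
--
--     new_boot_order.extend(no_match)
--
--     return new_boot_order
-- ===== SOURCE B (Python) =====
-- def boot_order_device_type_to_top(device_type_str='NIC', current_boot_order=[]):
--     return sorted(current_boot_order, key=lambda s: not s.startswith(device_type_str))
-- ===== Notes on version B (the rewrite author's own statement) =====
-- stated objective: idiomatic
-- what changed: Replaces the explicit two-accumulator partition loop with a single stable sort keyed on the negated startswith match, whose stability preserves the original relative order within each group.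
import Mathlib
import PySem

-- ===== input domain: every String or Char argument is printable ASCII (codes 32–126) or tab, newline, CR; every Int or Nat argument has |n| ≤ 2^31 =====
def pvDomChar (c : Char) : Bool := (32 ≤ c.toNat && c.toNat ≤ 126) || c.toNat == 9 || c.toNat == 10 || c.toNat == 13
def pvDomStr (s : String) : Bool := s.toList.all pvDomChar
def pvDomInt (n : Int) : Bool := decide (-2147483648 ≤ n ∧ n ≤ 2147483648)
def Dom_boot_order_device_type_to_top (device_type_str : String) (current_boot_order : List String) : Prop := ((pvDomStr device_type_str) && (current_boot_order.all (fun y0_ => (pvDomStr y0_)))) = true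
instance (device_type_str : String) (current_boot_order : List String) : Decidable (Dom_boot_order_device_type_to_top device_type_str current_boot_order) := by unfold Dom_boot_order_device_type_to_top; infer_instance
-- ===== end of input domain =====

-- B replaces A's two-accumulator partition loop with one stable sort on the boolean
-- negated startswith match (idiomatic; same return value, no mutation).

-- ===== PORT A =====
-- A's loop keeps two accumulators (matches, non-matches) and appends the second to the first.
def boot_order_device_type_to_top (device_type_str : String) (current_boot_order : List String) : List String :=
  let p := current_boot_order.foldl
    (fun (acc : List String × List String) struc_boot_str =>
      if PySem.Str.startswith struc_boot_str device_type_str then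
        (acc.1 ++ [struc_boot_str], acc.2)
      else
        (acc.1, acc.2 ++ [struc_boot_str]))
    ([], [])
  p.1 ++ p.2

-- ===== PORT B =====
-- sorted(current_boot_order, key=lambda s: not s.startswith(device_type_str))
def boot_order_device_type_to_top_alt (device_type_str : String) (current_boot_order : List String) : List String :=
  PySem.List.sorted current_boot_order (fun s => !PySem.Str.startswith s device_type_str) false

-- ===== PRECONDITION & SPEC =====
def Spec_boot_order_device_type_to_top (device_type_str : String) (current_boot_order : List String) (out : List String) : Prop := out = boot_order_device_type_to_top_alt device_type_str current_boot_order
instance (device_type_str : String) (current_boot_order : List String) (out : List String) : Decidable (Spec_boot_order_device_type_to_top device_type_str current_boot_order out) := by unfold Spec_boot_order_device_type_to_top; infer_instance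

-- ===== CLAIM (what is proved, stated in full; the proofs are below) =====
def Claim_equal_boot_order_device_type_to_top : Prop := ∀ (device_type_str : String) (current_boot_order : List String), Dom_boot_order_device_type_to_top device_type_str current_boot_order → Spec_boot_order_device_type_to_top device_type_str current_boot_order (boot_order_device_type_to_top device_type_str current_boot_order)

-- ===== LEMMAS AND PROOFS =====

-- Inserting an element whose key is false passes over all key-false elements and lands
-- just before the key-true block.
theorem insertBy_false_append {α : Type} (key : α → Bool) (x : α) (F T : List α)
    (hx : key x = false) (hF : ∀ y ∈ F, key y = false) (hT : ∀ y ∈ T, key y = true) :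
    PySem.List.insertBy (fun a b => decide (key a < key b)) x (F ++ T)
      = F ++ x :: T := by
  induction F with
  | nil =>
    cases T with
    | nil => simp [PySem.List.insertBy]
    | cons t ts =>
      have ht : key t = true := hT t (by simp)
      simp [PySem.List.insertBy, hx, ht]
  | cons f fs ih =>
    have hf : key f = false := hF f (by simp)
    have hc : decide (key x < key f) = false := by simp [hx, hf]
    simp only [List.cons_append, PySem.List.insertBy, hc, Bool.false_eq_true, if_false]
    simp [ih (fun y hy => hF y (by simp [hy]))]

-- The insertion-sort fold on a boolean key is the stable partition, prefix by prefix.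
theorem foldl_insertBy_bool {α : Type} (key : α → Bool) :
    ∀ (xs F T : List α), (∀ y ∈ F, key y = false) → (∀ y ∈ T, key y = true) →
      xs.foldl (fun acc x => PySem.List.insertBy (fun a b => decide (key a < key b)) x acc) (F ++ T)
        = (F ++ xs.filter (fun x => !key x)) ++ (T ++ xs.filter key) := by
  intro xs
  induction xs with
  | nil => intro F T _ _; simp
  | cons x xs ih =>
    intro F T hF hT
    by_cases hx : key x = true
    · have hstep : PySem.List.insertBy (fun a b => decide (key a < key b)) x (F ++ T)
          = (F ++ T) ++ [x] := by
        apply PySem.List.insertBy_of_forall_not_before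
        intro y _; simp [hx]
      have := ih F (T ++ [x]) hF (by intro y hy; rcases List.mem_append.1 hy with h | h
                                     · exact hT y h
                                     · simpa [List.mem_singleton.1 h] using hx)
      simp only [List.foldl_cons, hstep, List.append_assoc] at this ⊢
      rw [this]
      simp [hx]
    · have hx' : key x = false := by simpa using hx
      have hstep := insertBy_false_append key x F T hx' hF hT
      have := ih (F ++ [x]) T (by intro y hy; rcases List.mem_append.1 hy with h | h
                                  · exact hF y h
                                  · simpa [List.mem_singleton.1 h] using hx') hT
      simp only [List.foldl_cons, hstep] at this ⊢
      have hxT : F ++ x :: T = (F ++ [x]) ++ T := by simp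
      rw [hxT, this]
      simp [hx']

-- Stable sort on a boolean key = key-false elements, then key-true elements, each in order.
theorem sorted_bool_key {α : Type} (xs : List α) (key : α → Bool) :
    PySem.List.sorted xs key false
      = xs.filter (fun x => !key x) ++ xs.filter key := by
  rw [PySem.List.sorted_eq_foldl_insertBy]
  simpa using foldl_insertBy_bool key xs [] [] (by simp) (by simp)

-- A's two-accumulator fold computes the same two filters.
theorem foldl_partition (p : String → Bool) :
    ∀ (xs : List String) (F T : List String),
      xs.foldl (fun (acc : List String × List String) s =>
          if p s then (acc.1 ++ [s], acc.2) else (acc.1, acc.2 ++ [s])) (F, T)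
        = (F ++ xs.filter p, T ++ xs.filter (fun s => !p s)) := by
  intro xs
  induction xs with
  | nil => intro F T; simp
  | cons x xs ih =>
    intro F T
    by_cases hx : p x = true
    · simp [hx, ih]
    · have hx' : p x = false := by simpa using hx
      simp [hx', ih]

-- ===== VERDICT (by name: the statement is the Claim_ definition above) =====
theorem boot_order_device_type_to_top_spec : Claim_equal_boot_order_device_type_to_top := by
  intro d l _
  unfold Spec_boot_order_device_type_to_top boot_order_device_type_to_top boot_order_device_type_to_top_alt
  rw [sorted_bool_key, foldl_partition (fun s => PySem.Str.startswith s d) l [] []]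
  simp
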